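-- pv_equiv track=rewrite | github.com/crowrbno/easy_processing_tool | add_layer_multi_dialog.py | convertColumnNumToLetter
-- ===== SOURCE A (Python) =====
-- __alphabet = ['A', 'B', 'C', 'D', 'E', 'F', 'G', 'H', 'I', 'J', 'K', 'L', 'M', 'N', 'O', 'P', 'Q', 'R', 'S', 'T', 'U', 'V', 'W', 'X', 'Y', 'Z']
--
-- def convertColumnNumToLetter(column):
--     converted = ""
--
--     #figure out the width of the converted text
--     columnCount = 1
--     base = len(__alphabet)
--     base_exponent = base
--     exponent = 1
--     while column > base_exponent:
--         column = column - base_exponent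
--         exponent = exponent + 1
--         columnCount = columnCount + 1
--         base_exponent = base_exponent * base
--
--     #calculate the actual column name
--     column = column - 1
--     while len(converted) < columnCount:
--         digit = column % base
--         column = (column - digit) // base
--         converted = __alphabet[digit] + converted
--
--     return converted
-- ===== SOURCE B (Python) =====
-- # Single do-while divmod loop (classic bijective base-26): emits one letter, then
-- # continues while the quotient is positive; one letter is always emitted, which is
-- # exactly A's behaviour (column 0 -> 'Z', negatives -> one letter).
-- def convertColumnNumToLetter(column):
--     letters = []
--     while True:
--         column, rem = divmod(column - 1, 26)
--         letters.append(chr(65 + rem))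
--         if column <= 0:
--             break
--     return ''.join(reversed(letters))
-- ===== Notes on version B (the rewrite author's own statement) =====
-- stated objective: simpler
-- what changed: Replaces A's two-loop scheme (width search by repeated subtraction of growing powers of 26, then a width-bounded fixed-base digit loop indexing an alphabet list) with one classic bijective-base-26 do-while loop: divmod(column-1,26), emit chr(65+rem), continue while the quotient is positive.
import Mathlib
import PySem

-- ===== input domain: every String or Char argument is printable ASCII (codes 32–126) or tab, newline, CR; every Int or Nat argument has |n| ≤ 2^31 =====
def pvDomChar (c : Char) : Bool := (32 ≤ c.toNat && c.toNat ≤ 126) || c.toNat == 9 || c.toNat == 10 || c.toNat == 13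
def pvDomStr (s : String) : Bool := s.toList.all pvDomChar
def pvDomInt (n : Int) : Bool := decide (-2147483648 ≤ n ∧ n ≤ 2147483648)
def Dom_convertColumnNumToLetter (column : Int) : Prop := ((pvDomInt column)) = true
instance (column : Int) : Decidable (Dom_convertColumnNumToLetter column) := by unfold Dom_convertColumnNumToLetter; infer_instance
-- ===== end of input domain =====

-- B replaces A's two loops (width search by subtracting growing powers of 26, then a
-- width-bounded fixed-base digit loop) with a single bijective-base-26 do-while divmod loop.


-- ===== PORT A =====
def pvAlphabet : List Char :=
  ['A','B','C','D','E','F','G','H','I','J','K','L','M',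
   'N','O','P','Q','R','S','T','U','V','W','X','Y','Z']

-- first while loop of A; the '0 < base_exponent' conjunct is a totality guard only
-- (base_exponent is always a positive power of 26 at the call sites)
def pvALoop1 (column exponent columnCount base_exponent : Int) : Int × Int × Int × Int :=
  if h : base_exponent < column ∧ 0 < base_exponent then
    pvALoop1 (column - base_exponent) (exponent + 1) (columnCount + 1) (base_exponent * 26)
  else
    (column, exponent, columnCount, base_exponent)
termination_by column.toNat
decreasing_by omega

-- second while loop of A
def pvALoop2 (column : Int) (converted : List Char) (columnCount : Int) : List Char :=
  if h : (converted.length : Int) < columnCount then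
    let digit := PySem.Int.mod column 26
    pvALoop2 (PySem.Int.floordiv (column - digit) 26)
      (((PySem.List.pyGet? pvAlphabet digit).getD 'A') :: converted) columnCount
  else
    converted
termination_by (columnCount - converted.length).toNat
decreasing_by simp; omega

def convertColumnNumToLetter (column : Int) : String :=
  let r := pvALoop1 column 1 1 26
  String.mk (pvALoop2 (r.1 - 1) [] r.2.2.1)

-- ===== PORT B =====
-- the do-while loop of B: emit one letter, continue while the quotient is positive
def pvBLoop (column : Int) (letters : List Char) : List Char :=
  let q := PySem.Int.floordiv (column - 1) 26
  let r := PySem.Int.mod (column - 1) 26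
  let letters' := letters ++ [Char.ofNat (65 + r.toNat)]
  if h : 0 < q then pvBLoop q letters' else letters'
termination_by column.toNat
decreasing_by
  have h26 : (0:Int) < 26 := by norm_num
  have h1 : (1:Int) ≤ PySem.Int.floordiv (column - 1) 26 := h
  rw [PySem.Int.le_floordiv_iff_mul_le h26] at h1
  have h2 : PySem.Int.floordiv (column - 1) 26 < column := by
    rw [PySem.Int.floordiv_lt_iff_lt_mul h26]; nlinarith
  omega

def convertColumnNumToLetter_alt (column : Int) : String :=
  String.mk (pvBLoop column []).reverse

-- ===== PRECONDITION & SPEC =====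
def Spec_convertColumnNumToLetter (column : Int) (out : String) : Prop := out = convertColumnNumToLetter_alt column
instance (column : Int) (out : String) : Decidable (Spec_convertColumnNumToLetter column out) := by unfold Spec_convertColumnNumToLetter; infer_instance

-- ===== CLAIM (what is proved, stated in full; the proofs are below) =====
def Claim_equal_convertColumnNumToLetter : Prop := ∀ (column : Int), Dom_convertColumnNumToLetter column → Spec_convertColumnNumToLetter column (convertColumnNumToLetter column)

-- ===== LEMMAS AND PROOFS =====

-- S d = 26 + 26^2 + … + 26^d  (count of columns of width ≤ d)
def pvS : Nat → Nat
  | 0 => 0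
  | d + 1 => 26 * (1 + pvS d)

-- bijective base-26 numeral of n, most significant letter first
def pvRep (n : Nat) : List Char :=
  if h : n = 0 then [] else
    pvRep ((n - 1) / 26) ++ [Char.ofNat (65 + (n - 1) % 26)]
termination_by n
decreasing_by have := Nat.div_le_self (n - 1) 26; omega

-- fixed-width base-26 numeral of n with k digits, most significant first
def pvFrep : Nat → Nat → List Char
  | 0, _ => []
  | k + 1, n => pvFrep k (n / 26) ++ [Char.ofNat (65 + n % 26)]

-- offsets subtracted by A's first loop: pvT k d = 26^k + 26^(k+1) + … + 26^(k+d-1)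
def pvT : Nat → Nat → Int
  | _, 0 => 0
  | k, d + 1 => (26:Int) ^ k + pvT (k + 1) d

def pvU : Nat → Nat
  | 0 => 0
  | d + 1 => 1 + 26 * pvU d

lemma pvT_eq (d : Nat) : ∀ k, pvT k d = (26:Int) ^ k * (pvU d : Int) := by
  induction d with
  | zero => intro k; simp [pvT, pvU]
  | succ d ih =>
      intro k
      simp only [pvT, pvU, ih (k + 1)]
      push_cast
      ring

lemma pvS_eq (d : Nat) : pvS d = 26 * pvU d := by
  induction d with
  | zero => simp [pvS, pvU]
  | succ d ih => simp only [pvS, pvU, ih]; try ring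

lemma pvT_one (d : Nat) : pvT 1 d = (pvS d : Int) := by
  rw [pvT_eq, pvS_eq]; push_cast; ring

lemma pvS_succ (d : Nat) : pvS (d + 1) = pvS d + 26 ^ (d + 1) := by
  induction d with
  | zero => simp [pvS]
  | succ d ih =>
      have h1 : pvS (d + 2) = 26 * (1 + pvS (d + 1)) := rfl
      have h2 : pvS (d + 1) = 26 * (1 + pvS d) := rfl
      have h3 : (26:Nat) ^ (d + 1 + 1) = 26 ^ (d + 1) * 26 := pow_succ _ _
      linarith [ih, h1, h2, h3]

lemma pvAlpha_get : ∀ d : Nat, d < 26 →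
    (PySem.List.pyGet? pvAlphabet ((d : Nat) : Int)).getD 'A' = Char.ofNat (65 + d) := by
  decide

lemma pvAlpha_get_mod (m : Int) :
    (PySem.List.pyGet? pvAlphabet (PySem.Int.mod m 26)).getD 'A'
      = Char.ofNat (65 + (PySem.Int.mod m 26).toNat) := by
  have h0 : (0:Int) ≤ PySem.Int.mod m 26 := PySem.Int.mod_nonneg m (by norm_num)
  have h1 : PySem.Int.mod m 26 < 26 := PySem.Int.mod_lt m (by norm_num)
  have he : PySem.Int.mod m 26 = ((PySem.Int.mod m 26).toNat : Int) := by omega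
  rw [he]
  exact pvAlpha_get _ (by omega)

-- B's loop computes the reversed bijective numeral (least significant first), appended to acc
lemma pvBLoop_rep : ∀ n : Nat, 1 ≤ n → ∀ acc : List Char,
    pvBLoop (n : Int) acc = acc ++ (pvRep n).reverse := by
  intro n
  induction n using Nat.strong_induction_on with
  | _ n ih =>
      intro hn acc
      rw [pvBLoop]
      have hc : ((n : Int) - 1) = ((n - 1 : Nat) : Int) := by omega
      rw [hc, show (26:Int) = ((26:Nat):Int) from rfl,
        PySem.Int.floordiv_natCast, PySem.Int.mod_natCast]
      have hn0 : ¬ n = 0 := by omega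
      have hrep : pvRep n = pvRep ((n - 1) / 26) ++ [Char.ofNat (65 + (n - 1) % 26)] := by
        conv_lhs => rw [pvRep]
        rw [dif_neg hn0]
      by_cases hq : 0 < (((n - 1) / 26 : Nat) : Int)
      · rw [dif_pos hq]
        have hq' : 1 ≤ (n - 1) / 26 := by exact_mod_cast hq
        have hlt : (n - 1) / 26 < n := by omega
        rw [ih _ hlt (by omega)]
        rw [hrep]
        simp only [List.reverse_append, List.reverse_cons, List.reverse_nil,
          List.nil_append, List.append_assoc, List.singleton_append, List.cons_append, Int.toNat_natCast]
      · rw [dif_neg hq]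
        have hq0 : (n - 1) / 26 = 0 := by omega
        rw [hrep, hq0]
        conv_rhs => rw [pvRep]
        simp only [List.reverse_append, List.reverse_cons, List.reverse_nil,
          List.nil_append, List.append_assoc, List.singleton_append, List.cons_append,
          dite_true, reduceDIte, Int.toNat_natCast]

-- A's second loop computes the fixed-width numeral of width (cnt − |conv|), prepended to conv
lemma pvALoop2_frep : ∀ j : Nat, ∀ (n : Nat) (conv : List Char) (cnt : Int),
    cnt = conv.length + j → pvALoop2 (n : Int) conv cnt = pvFrep j n ++ conv := by
  intro j
  induction j with
  | zero =>
      intro n conv cnt hcnt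
      rw [pvALoop2, dif_neg (by omega)]
      simp [pvFrep]
  | succ j ih =>
      intro n conv cnt hcnt
      rw [pvALoop2, dif_pos (by push_cast [hcnt]; omega)]
      rw [show (26:Int) = ((26:Nat):Int) from rfl]
      simp only [PySem.Int.mod_natCast]
      have hc : ((n : Int) - ((n % 26 : Nat) : Int)) = ((n - n % 26 : Nat) : Int) := by
        have := Nat.mod_le n 26; omega
      rw [hc, PySem.Int.floordiv_natCast]
      have hdiv : (n - n % 26) / 26 = n / 26 := by omega
      rw [hdiv, pvAlpha_get (n % 26) (by omega)]
      rw [ih (n / 26) _ cnt (by push_cast [hcnt]; simp; omega)]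
      simp [pvFrep]

-- invariant of A's first loop, entered with base_exponent = 26^k
lemma pvALoop1_inv : ∀ n : Nat, ∀ (c e cnt : Int) (k : Nat), c.toNat = n → 1 ≤ c →
    ∃ (d : Nat) (c' : Int),
      pvALoop1 c e cnt ((26:Int) ^ k) = (c', e + d, cnt + d, (26:Int) ^ (k + d)) ∧
      c = c' + pvT k d ∧ 1 ≤ c' ∧ c' ≤ (26:Int) ^ (k + d) := by
  intro n
  induction n using Nat.strong_induction_on with
  | _ n ih =>
      intro c e cnt k hn hc
      rw [pvALoop1]
      by_cases hgt : (26:Int) ^ k < c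
      · rw [dif_pos ⟨hgt, by positivity⟩]
        have hpow : (0:Int) < 26 ^ k := by positivity
        have hlt : (c - 26 ^ k).toNat < n := by omega
        obtain ⟨d, c', hres, hsum, hc1, hc2⟩ :=
          ih _ hlt (c - 26 ^ k) (e + 1) (cnt + 1) (k + 1) rfl (by omega)
        refine ⟨d + 1, c', ?_, ?_, hc1, ?_⟩
        · have h26 : (26:Int) ^ k * 26 = 26 ^ (k + 1) := by rw [pow_succ]
          rw [h26, hres]
          refine Prod.ext ?_ (Prod.ext ?_ (Prod.ext ?_ ?_)) <;> simp <;> push_cast <;>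
            first | ring | rw [show k + (d + 1) = k + 1 + d by omega]
        · simp only [pvT]; omega
        · rw [show k + (d + 1) = k + 1 + d by omega]; exact hc2
      · rw [dif_neg (by tauto)]
        refine ⟨0, c, by simp, by simp [pvT], hc, ?_⟩
        simp only [Nat.add_zero]
        exact not_lt.mp hgt

-- the arithmetic heart: the bijective numeral of n with width d+1 is the fixed-width
-- (d+1)-digit base-26 numeral of n − S d − 1, for S d < n ≤ S (d+1)
lemma pvRep_frep : ∀ d : Nat, ∀ n : Nat, pvS d < n → n ≤ pvS (d + 1) →
    pvRep n = pvFrep (d + 1) (n - pvS d - 1) := by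
  intro d
  induction d with
  | zero =>
      intro n h1 h2
      simp only [pvS] at h1 h2
      rw [pvRep]
      have hn0 : ¬ n = 0 := by omega
      simp only [hn0, dite_false]
      have hd : (n - 1) / 26 = 0 := by omega
      rw [hd, pvRep]
      have hz : n - 0 - 1 = n - 1 := by omega
      have hm : (n - 1) % 26 = n - 1 := by omega
      simp only [pvFrep, pvS, hz, hm]
      simp
  | succ d ih =>
      intro n h1 h2
      have hS1 : pvS (d + 1) = 26 * (1 + pvS d) := rfl
      have hS2 : pvS (d + 1 + 1) = 26 * (1 + pvS (d + 1)) := rfl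
      set m := n - pvS (d + 1) - 1 with hm
      have hmod : m % 26 = (n - 1) % 26 := by omega
      have hdiv : m / 26 = (n - 1) / 26 - pvS d - 1 := by omega
      have hlo : pvS d < (n - 1) / 26 := by omega
      have hhi : (n - 1) / 26 ≤ pvS (d + 1) := by omega
      rw [pvRep]
      have hn0 : ¬ n = 0 := by omega
      simp only [hn0, dite_false]
      rw [ih _ hlo hhi]
      show _ = pvFrep (d + 1 + 1) m
      simp only [pvFrep]
      rw [hmod, hdiv]

-- ===== VERDICT (by name: the statement is the Claim_ definition above) =====
theorem convertColumnNumToLetter_spec : Claim_equal_convertColumnNumToLetter := by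
  intro column _
  unfold Spec_convertColumnNumToLetter convertColumnNumToLetter convertColumnNumToLetter_alt
  by_cases hpos : 1 ≤ column
  · -- positive columns: both compute the bijective base-26 numeral
    set n := column.toNat with hn
    have hcol : column = (n : Int) := by omega
    have hn1 : 1 ≤ n := by omega
    -- A's first loop
    obtain ⟨d, c', hres, hsum, hc1, hc2⟩ :=
      pvALoop1_inv n column 1 1 1 rfl hpos
    rw [pvT_one] at hsum
    rw [show ((26:Int) ^ 1) = 26 by norm_num] at hres
    rw [hres]
    show String.mk (pvALoop2 (c' - 1) [] (1 + (d:Int))) = String.mk (pvBLoop column []).reverse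
    -- A's second loop
    have hc' : c' - 1 = ((c'.toNat - 1 : Nat) : Int) := by omega
    rw [hc', pvALoop2_frep (d + 1) _ [] _ (by push_cast [List.length_nil]; omega)]
    -- B's loop
    rw [hcol, pvBLoop_rep n hn1 []]
    -- the numeral identity
    have hlt : pvS d < n := by omega
    have hle : n ≤ pvS (d + 1) := by
      have h2 : (26:Int) ^ (1 + d) = ((26 ^ (d + 1) : Nat) : Int) := by
        push_cast; rw [show 1 + d = d + 1 by omega]
      rw [pvS_succ]; omega
    have harg : c'.toNat - 1 = n - pvS d - 1 := by omega
    rw [harg, ← pvRep_frep d n hlt hle]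
    simp
  · -- column ≤ 0: both return the single letter for (column − 1) mod 26
    have h26 : (0:Int) < 26 := by norm_num
    -- A: first loop does not run, second loop runs exactly once
    rw [pvALoop1, dif_neg (by omega)]
    show String.mk (pvALoop2 (column - 1) [] 1) = String.mk (pvBLoop column []).reverse
    rw [pvALoop2, dif_pos (by simp)]
    rw [pvALoop2, dif_neg (by simp)]
    -- B: the quotient is ≤ 0 after the first emission
    rw [pvBLoop]
    have hq : ¬ (0 < PySem.Int.floordiv (column - 1) 26) := by
      have : PySem.Int.floordiv (column - 1) 26 < 1 := by
        rw [PySem.Int.floordiv_lt_iff_lt_mul h26]; omega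
      omega
    rw [dif_neg hq]
    rw [pvAlpha_get_mod]
    simp
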